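-- pv_equiv track=rewrite | github.com/sodiumYT/och16 | main.py | och16
-- ===== SOURCE A (Python) =====
-- def och16(message):
--     bits = bin(int.from_bytes(message.encode('utf-8', 'surrogatepass'), 'big'))[2:]
--     ones = bits.zfill(8 * ((len(bits) + 7) // 8)).count('1')
--     message_bytes = message.encode('utf-8')
--     hash_value = 0
--     for char in message_bytes:
--         hash_value = hash_value * 31 + char
--         hash_value &= 0xFFFFFFFFFFFFFFFF
--     return str(ones) + 'x' + format(hash_value, '08x')
-- ===== SOURCE B (Python) =====
-- def och16(message):
--     message_bytes = message.encode('utf-8')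
--     ones = 0
--     hash_value = 0
--     for char in message_bytes:
--         ones += bin(char).count('1')
--         hash_value = (hash_value * 31 + char) & 0xFFFFFFFFFFFFFFFF
--     return str(ones) + 'x' + format(hash_value, '08x')
-- ===== Notes on version B (the rewrite author's own statement) =====
-- stated objective: simpler
-- what changed: Replaced the big-int/binary-string/zfill popcount pipeline plus a separate hashing loop with a single byte-wise pass that accumulates both the per-byte popcount and the hash.
import Mathlib
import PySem

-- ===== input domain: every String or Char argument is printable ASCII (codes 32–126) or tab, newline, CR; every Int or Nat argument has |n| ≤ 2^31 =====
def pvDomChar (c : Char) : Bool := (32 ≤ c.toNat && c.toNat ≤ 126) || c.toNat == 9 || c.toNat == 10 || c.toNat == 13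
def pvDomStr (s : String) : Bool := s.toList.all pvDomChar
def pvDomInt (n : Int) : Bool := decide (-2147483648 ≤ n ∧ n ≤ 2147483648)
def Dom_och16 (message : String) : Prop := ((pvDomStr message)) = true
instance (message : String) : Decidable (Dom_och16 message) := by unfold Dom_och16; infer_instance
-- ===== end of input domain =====

-- B fuses A's big-int/binary-string popcount pipeline and separate hash loop into one byte-wise pass (objective: simpler).


-- ===== PORT A =====
-- bin(n)[2:] as a char list (repeated divmod by 2; exact for Nat)
def pyBinAux (n : Nat) : List Char :=
  if h : n = 0 then [] else pyBinAux (n / 2) ++ [if n % 2 = 1 then '1' else '0']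
decreasing_by exact Nat.div_lt_self (Nat.pos_of_ne_zero h) (by norm_num)

def pyBin (n : Nat) : List Char := if n = 0 then ['0'] else pyBinAux n

-- format(n, 'x') digits (repeated divmod by 16; exact for Nat)
def pyHexDigit (d : Nat) : Char := if d < 10 then Char.ofNat (48 + d) else Char.ofNat (87 + d)

def pyHexAux (n : Nat) : List Char :=
  if h : n = 0 then [] else pyHexAux (n / 16) ++ [pyHexDigit (n % 16)]
decreasing_by exact Nat.div_lt_self (Nat.pos_of_ne_zero h) (by norm_num)

-- format(n, '08x'): hex digits zero-padded on the left to width 8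
def pyHexPad8 (n : Nat) : List Char :=
  let s := if n = 0 then ['0'] else pyHexAux n
  List.replicate (8 - s.length) '0' ++ s

def och16 (message : String) : String :=
  -- message.encode('utf-8', 'surrogatepass'): on the ASCII domain, the bytes are the code points
  let bytesS : List Nat := message.toList.map (fun c => c.toNat)
  -- int.from_bytes(..., 'big')
  let n : Nat := bytesS.foldl (fun a b => a * 256 + b) 0
  let bits : List Char := pyBin n
  -- bits.zfill(8 * ((len(bits)+7)//8)).count('1')
  let ones : Nat :=
    (List.replicate (8 * ((bits.length + 7) / 8) - bits.length) '0' ++ bits).count '1'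
  -- message.encode('utf-8'): same bytes on the ASCII domain
  let bytes : List Nat := message.toList.map (fun c => c.toNat)
  let hash : Nat := bytes.foldl (fun h b => (h * 31 + b) % 18446744073709551616) 0
  PySem.Int.toStr (ones : Int) ++ "x" ++ String.ofList (pyHexPad8 hash)

-- ===== PORT B =====
def och16_alt (message : String) : String :=
  let bytes : List Nat := message.toList.map (fun c => c.toNat)
  let p : Nat × Nat := bytes.foldl
    (fun (p : Nat × Nat) b =>
      (p.1 + (pyBin b).count '1', (p.2 * 31 + b) % 18446744073709551616)) (0, 0)
  PySem.Int.toStr (p.1 : Int) ++ "x" ++ String.ofList (pyHexPad8 p.2)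

-- ===== PRECONDITION & SPEC =====
def Spec_och16 (message : String) (out : String) : Prop := out = och16_alt message
instance (message : String) (out : String) : Decidable (Spec_och16 message out) := by unfold Spec_och16; infer_instance

-- ===== CLAIM (what is proved, stated in full; the proofs are below) =====
def Claim_equal_och16 : Prop := ∀ (message : String), Dom_och16 message → Spec_och16 message (och16 message)

-- ===== LEMMAS AND PROOFS =====

-- number of set bits
def bc (n : Nat) : Nat :=
  if h : n = 0 then 0 else bc (n / 2) + n % 2
decreasing_by exact Nat.div_lt_self (Nat.pos_of_ne_zero h) (by norm_num)

theorem bc_zero : bc 0 = 0 := by rw [bc]; rfl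

theorem bc_step (n : Nat) : bc n = bc (n / 2) + n % 2 := by
  by_cases h : n = 0
  · subst h; rw [bc_zero]
  · rw [bc]; simp [h]

theorem count1_pyBinAux (n : Nat) : (pyBinAux n).count '1' = bc n := by
  induction n using Nat.strong_induction_on with
  | _ n ih =>
    by_cases h : n = 0
    · subst h; rw [bc_zero]; simp [pyBinAux]
    · rw [pyBinAux, bc]
      simp only [h, dite_false]
      rw [List.count_append, ih (n / 2) (Nat.div_lt_self (Nat.pos_of_ne_zero h) (by norm_num))]
      by_cases h2 : n % 2 = 1
      · simp [h2]
      · have : n % 2 = 0 := by omega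
        simp [this]

theorem count1_pyBin (n : Nat) : (pyBin n).count '1' = bc n := by
  by_cases h : n = 0
  · subst h; rw [bc_zero]; simp [pyBin]
  · simp [pyBin, h, count1_pyBinAux]

theorem bc_shift_add (k : Nat) : ∀ a b : Nat, b < 2 ^ k → bc (a * 2 ^ k + b) = bc a + bc b := by
  induction k with
  | zero =>
    intro a b hb
    have hb0 : b = 0 := by omega
    subst hb0
    simp [bc_zero]
  | succ k ih =>
    intro a b hb
    have e : a * 2 ^ (k + 1) + b = b + a * 2 ^ k * 2 := by rw [pow_succ]; ring
    rw [bc_step (a * 2 ^ (k + 1) + b), e,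
        Nat.add_mul_div_right _ _ (by norm_num : (0:Nat) < 2),
        Nat.add_mul_mod_self_right, Nat.add_comm (b / 2),
        ih a (b / 2) (by rw [pow_succ] at hb; omega), bc_step b]
    ring

theorem bc_byte_add (a b : Nat) (hb : b < 256) : bc (a * 256 + b) = bc a + bc b :=
  bc_shift_add 8 a b (by norm_num [hb])

theorem bc_fold (l : List Nat) (hl : ∀ b ∈ l, b < 256) :
    ∀ i : Nat, bc (l.foldl (fun a b => a * 256 + b) i) = l.foldl (fun s b => s + bc b) (bc i) := by
  induction l with
  | nil => intro i; simp
  | cons b l ih =>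
    intro i
    simp only [List.foldl_cons]
    rw [ih (fun x hx => hl x (List.mem_cons_of_mem _ hx)),
        bc_byte_add i b (hl b (List.mem_cons_self ..))]

-- the fused fold computes the two separate folds
theorem fold_pair (l : List Nat) : ∀ o h : Nat,
    l.foldl (fun (p : Nat × Nat) b =>
      (p.1 + (pyBin b).count '1', (p.2 * 31 + b) % 18446744073709551616)) (o, h)
    = (l.foldl (fun s b => s + (pyBin b).count '1') o,
       l.foldl (fun h b => (h * 31 + b) % 18446744073709551616) h) := by
  induction l with
  | nil => intro o h; simp
  | cons b l ih => intro o h; simp only [List.foldl_cons]; exact ih _ _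

theorem count1_zfill (k : Nat) (l : List Char) :
    (List.replicate k '0' ++ l).count '1' = l.count '1' := by
  simp [List.count_append, List.count_replicate]

theorem dom_byte_lt (c : Char) (h : pvDomChar c = true) : c.toNat < 256 := by
  simp [pvDomChar] at h
  omega

-- ===== VERDICT (by name: the statement is the Claim_ definition above) =====
theorem och16_spec : Claim_equal_och16 := by
  intro message hdom
  have hb : ∀ b ∈ message.toList.map (fun c => c.toNat), b < 256 := by
    intro b hbm
    rcases List.mem_map.mp hbm with ⟨c, hc, rfl⟩
    exact dom_byte_lt c ((List.all_eq_true.mp hdom) c hc)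
  have hfun : (fun (s b : Nat) => s + bc b) = (fun s b => s + (pyBin b).count '1') := by
    funext s b; rw [count1_pyBin]
  unfold Spec_och16 och16 och16_alt
  simp only [fold_pair]
  rw [count1_zfill, count1_pyBin, bc_fold _ hb, bc_zero, hfun]
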